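-- pv_equiv track=rewrite | github.com/toothlessG22/adventofcode2022 | 17/main.py | top_90_rows_as_tuple
-- ===== SOURCE A (Python) =====
-- def top_90_rows_as_tuple(current_rocks, max_height):
--     nums = []
--
--     for i in range(10):
--         num = 0
--         offset = i * 9
--
--         for j in range(9):
--             bit_offset = j * 7
--
--             for k in range(7):
--
--                 r = max_height - (offset + j)
--
--                 if (r, k) in current_rocks:
--                     num |= (1 << (bit_offset + k))
--
--         nums.append(num)
--
--     return tuple(nums)
--
-- current_rocks = set()
-- ===== SOURCE B (Python) =====
-- def top_90_rows_as_tuple(current_rocks, max_height):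
--     # One pass over the sparse rock set instead of scanning all 630 grid cells.
--     nums = [0] * 10
--     for (r, k) in current_rocks:
--         pos = max_height - r
--         if 0 <= pos < 90 and 0 <= k < 7:
--             nums[pos // 9] |= 1 << ((pos % 9) * 7 + k)
--     return tuple(nums)
-- ===== Notes on version B (the rewrite author's own statement) =====
-- stated objective: alternative
-- what changed: Instead of scanning all 10*9*7 = 630 grid cells of the window and testing each coordinate for membership in the rock collection, B makes a single arithmetic pass over the rocks themselves, computing each rock's block index and bit position and OR-ing it into a preallocated 10-slot array.
import Mathlib
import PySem

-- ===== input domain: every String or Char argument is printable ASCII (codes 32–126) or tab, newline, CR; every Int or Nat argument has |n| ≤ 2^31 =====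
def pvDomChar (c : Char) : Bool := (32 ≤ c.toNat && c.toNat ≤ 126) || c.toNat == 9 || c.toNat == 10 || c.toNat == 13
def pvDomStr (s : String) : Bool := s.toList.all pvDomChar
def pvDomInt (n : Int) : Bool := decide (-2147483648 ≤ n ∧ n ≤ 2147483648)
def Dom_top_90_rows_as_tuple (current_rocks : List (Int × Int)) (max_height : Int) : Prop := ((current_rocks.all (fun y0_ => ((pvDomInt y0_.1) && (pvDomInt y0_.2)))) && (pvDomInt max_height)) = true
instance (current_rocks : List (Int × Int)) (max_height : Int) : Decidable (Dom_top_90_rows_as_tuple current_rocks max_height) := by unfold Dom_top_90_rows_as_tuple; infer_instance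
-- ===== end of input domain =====

-- B replaces A's scan of all 10×9×7 grid cells (each with a membership test in the
-- rock list) by a single pass over the rock list itself; return values proved equal.

-- ===== PORT A =====
-- literal transliteration of A: range(10)/range(9)/range(7) are literal non-negative
-- ranges, ported as Nat ranges (exact); 'in current_rocks' is list membership.
def top_90_rows_as_tuple (current_rocks : List (Int × Int)) (max_height : Int) : List Int :=
  (List.range 10).foldl (fun (nums : List Int) (i : Nat) =>
    let offset : Nat := i * 9
    let num : Int := (List.range 9).foldl (fun (num : Int) (j : Nat) =>
      let bit_offset : Nat := j * 7
      (List.range 7).foldl (fun (num : Int) (k : Nat) =>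
        let r := max_height - ((offset + j : Nat) : Int)
        if (r, (k : Int)) ∈ current_rocks then
          PySem.Int.bor num ((1 : Int) <<< (bit_offset + k))
        else num) num) 0
    nums ++ [num]) []

-- ===== PORT B =====
-- one fold over the rocks; inside the guard 0 ≤ pos < 90 and 0 ≤ rk.2 < 7 hold, so
-- pos // 9 ∈ [0,10) and pos % 9 * 7 + rk.2 ≥ 0: the .toNat conversions are exact
-- (they mirror Python's nums[pos//9] read/write and the 1 << … shift amount).
def top_90_rows_as_tuple_alt (current_rocks : List (Int × Int)) (max_height : Int) : List Int :=
  current_rocks.foldl (fun nums rk =>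
    let pos := max_height - rk.1
    if 0 ≤ pos ∧ pos < 90 ∧ 0 ≤ rk.2 ∧ rk.2 < 7 then
      let idx := (PySem.Int.floordiv pos 9).toNat
      nums.set idx (PySem.Int.bor (nums.getD idx 0)
        ((1 : Int) <<< ((PySem.Int.mod pos 9) * 7 + rk.2).toNat))
    else nums) (List.replicate 10 0)

-- ===== PRECONDITION & SPEC =====
def Spec_top_90_rows_as_tuple (current_rocks : List (Int × Int)) (max_height : Int) (out : List Int) : Prop := out = top_90_rows_as_tuple_alt current_rocks max_height
instance (current_rocks : List (Int × Int)) (max_height : Int) (out : List Int) : Decidable (Spec_top_90_rows_as_tuple current_rocks max_height out) := by unfold Spec_top_90_rows_as_tuple; infer_instance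

-- ===== CLAIM (what is proved, stated in full; the proofs are below) =====
def Claim_equal_top_90_rows_as_tuple : Prop := ∀ (current_rocks : List (Int × Int)) (max_height : Int), Dom_top_90_rows_as_tuple current_rocks max_height → Spec_top_90_rows_as_tuple current_rocks max_height (top_90_rows_as_tuple current_rocks max_height)

-- ===== LEMMAS AND PROOFS =====

-- Nat-level model of A's per-block number
def numAN (R : List (Int × Int)) (mh : Int) (i : Nat) : Nat :=
  (List.range 9).foldl (fun (num : Nat) (j : Nat) =>
    (List.range 7).foldl (fun (num : Nat) (k : Nat) =>
      if (mh - ((i * 9 + j : Nat) : Int), (k : Int)) ∈ R then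
        num ||| 1 <<< (j * 7 + k)
      else num) num) 0

-- Nat-level model of B's fold step
def stepBN (mh : Int) (ns : List Nat) (rk : Int × Int) : List Nat :=
  let pos := mh - rk.1
  if 0 ≤ pos ∧ pos < 90 ∧ 0 ≤ rk.2 ∧ rk.2 < 7 then
    let idx := (PySem.Int.floordiv pos 9).toNat
    ns.set idx ((ns.getD idx 0) ||| 1 <<< ((PySem.Int.mod pos 9) * 7 + rk.2).toNat)
  else ns

-- which (block i, bit t) positions A's grid scan for block i sets
def gA (R : List (Int × Int)) (mh : Int) (i t : Nat) : Bool :=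
  (List.range 9).any (fun j => (List.range 7).any (fun k =>
    decide ((mh - ((i * 9 + j : Nat) : Int), (k : Int)) ∈ R) && (j * 7 + k == t)))

-- which (block i, bit t) one rock rk sets in B
def gB (mh : Int) (i t : Nat) (rk : Int × Int) : Bool :=
  decide (0 ≤ mh - rk.1 ∧ mh - rk.1 < 90 ∧ 0 ≤ rk.2 ∧ rk.2 < 7)
  && ((PySem.Int.floordiv (mh - rk.1) 9).toNat == i)
  && (((PySem.Int.mod (mh - rk.1) 9) * 7 + rk.2).toNat == t)

lemma testBit_or_shift (a m t : Nat) :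
    (a ||| 1 <<< m).testBit t = (a.testBit t || (m == t)) := by
  simp only [Nat.testBit_or, Nat.shiftLeft_eq, one_mul, Nat.testBit_two_pow]
  by_cases hm : m = t <;> simp [hm]

lemma foldl_testBit {α : Type} (step : Nat → α → Nat) (g : α → Nat → Bool)
    (h : ∀ a x t, (step a x).testBit t = (a.testBit t || g x t)) :
    ∀ (L : List α) (a t : Nat),
      (L.foldl step a).testBit t = (a.testBit t || L.any (fun x => g x t)) := by
  intro L
  induction L with
  | nil => simp
  | cons x xs ih => intro a t; simp [List.foldl_cons, ih, h, Bool.or_assoc]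

lemma numAN_testBit (R : List (Int × Int)) (mh : Int) (i t : Nat) :
    (numAN R mh i).testBit t = gA R mh i t := by
  have hin : ∀ (j : Nat) (a k t : Nat),
      ((fun (num : Nat) (k : Nat) =>
        if (mh - ((i * 9 + j : Nat) : Int), (k : Int)) ∈ R then num ||| 1 <<< (j * 7 + k)
        else num) a k).testBit t
      = (a.testBit t || (decide ((mh - ((i * 9 + j : Nat) : Int), (k : Int)) ∈ R) && (j * 7 + k == t))) := by
    intro j a k t
    by_cases hm : (mh - ((i * 9 + j : Nat) : Int), (k : Int)) ∈ R
    · simp only [if_pos hm, hm, decide_true, Bool.true_and, if_true, testBit_or_shift]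
    · simp only [if_neg hm, hm, decide_false, Bool.false_and, Bool.or_false, if_false]
  have hout : ∀ (a : Nat) (j : Nat) (t : Nat),
      ((fun (num : Nat) (j : Nat) =>
        (List.range 7).foldl (fun (num : Nat) (k : Nat) =>
          if (mh - ((i * 9 + j : Nat) : Int), (k : Int)) ∈ R then num ||| 1 <<< (j * 7 + k)
          else num) num) a j).testBit t
      = (a.testBit t || (fun (j t : Nat) => (List.range 7).any (fun k =>
          decide ((mh - ((i * 9 + j : Nat) : Int), (k : Int)) ∈ R) && (j * 7 + k == t))) j t) := by
    intro a j t
    exact foldl_testBit _ _ (hin j) (List.range 7) a t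
  have h2 := foldl_testBit _ _ hout (List.range 9) 0 t
  unfold numAN gA
  rw [h2]
  simp [Nat.zero_testBit]

lemma idx_lt_10 (pos : Int) (h0 : 0 ≤ pos) (h90 : pos < 90) :
    (PySem.Int.floordiv pos 9).toNat < 10 := by
  have h1 : PySem.Int.floordiv pos 9 < 10 := by
    rw [PySem.Int.floordiv_lt_iff_lt_mul (by omega)]; omega
  omega

lemma stepBN_getD_testBit (mh : Int) (ns : List Nat) (rk : Int × Int)
    (hlen : ns.length = 10) (i : Nat) (hi : i < 10) (t : Nat) :
    (((stepBN mh ns rk).getD i 0)).testBit t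
      = ((ns.getD i 0).testBit t || gB mh i t rk) := by
  unfold stepBN gB
  by_cases hc : 0 ≤ mh - rk.1 ∧ mh - rk.1 < 90 ∧ 0 ≤ rk.2 ∧ rk.2 < 7
  · have hdec : decide (0 ≤ mh - rk.1 ∧ mh - rk.1 < 90 ∧ 0 ≤ rk.2 ∧ rk.2 < 7) = true :=
      decide_eq_true hc
    rw [if_pos hc, hdec]
    simp only [Bool.true_and]
    set idx := (PySem.Int.floordiv (mh - rk.1) 9).toNat with hidxdef
    have hidx : idx < 10 := idx_lt_10 _ hc.1 hc.2.1
    by_cases hii : idx = i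
    · subst hii
      have : (ns.set idx ((ns.getD idx 0) ||| 1 <<< ((PySem.Int.mod (mh - rk.1) 9) * 7 + rk.2).toNat)).getD idx 0
          = (ns.getD idx 0) ||| 1 <<< ((PySem.Int.mod (mh - rk.1) 9) * 7 + rk.2).toNat := by
        rw [List.getD_eq_getElem?_getD, List.getElem?_set_self (by omega)]
        simp [List.getD_eq_getElem?_getD]
      rw [this, testBit_or_shift]
      simp
    · have : (ns.set idx ((ns.getD idx 0) ||| 1 <<< ((PySem.Int.mod (mh - rk.1) 9) * 7 + rk.2).toNat)).getD i 0
          = ns.getD i 0 := by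
        rw [List.getD_eq_getElem?_getD, List.getElem?_set_ne (by omega), ← List.getD_eq_getElem?_getD]
      rw [this]
      simp [hii]
  · rw [if_neg hc, decide_eq_false hc]
    simp

lemma foldB_testBit (mh : Int) (R : List (Int × Int)) :
    ∀ (ns : List Nat), ns.length = 10 → ∀ i, i < 10 → ∀ t,
      ((R.foldl (stepBN mh) ns).getD i 0).testBit t
        = (((ns.getD i 0).testBit t) || R.any (gB mh i t)) := by
  induction R with
  | nil => intro ns _ i _ t; simp
  | cons rk R ih =>
    intro ns hlen i hi t
    have hlen2 : (stepBN mh ns rk).length = 10 := by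
      unfold stepBN; dsimp only; split <;> simp [hlen]
    rw [List.foldl_cons, ih _ hlen2 i hi t, stepBN_getD_testBit mh ns rk hlen i hi t,
      List.any_cons, Bool.or_assoc]

lemma gA_eq_gB (R : List (Int × Int)) (mh : Int) (i t : Nat) (hi : i < 10) :
    gA R mh i t = R.any (gB mh i t) := by
  rw [Bool.eq_iff_iff]
  simp only [gA, gB, List.any_eq_true, List.mem_range, Bool.and_eq_true, decide_eq_true_eq,
    beq_iff_eq]
  constructor
  · rintro ⟨j, hj, k, hk, hmem, hbit⟩
    refine ⟨(mh - ((i * 9 + j : Nat) : Int), (k : Int)), hmem, ?_⟩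
    have hpos : mh - (mh - ((i * 9 + j : Nat) : Int)) = ((i * 9 + j : Nat) : Int) := by ring
    rw [hpos]
    have hfm := PySem.Int.floordiv_mul_add_mod ((i * 9 + j : Nat) : Int) 9
    have hm0 := PySem.Int.mod_nonneg ((i * 9 + j : Nat) : Int) (b := 9) (by omega)
    have hm9 := PySem.Int.mod_lt ((i * 9 + j : Nat) : Int) (b := 9) (by omega)
    set q := PySem.Int.floordiv ((i * 9 + j : Nat) : Int) 9 with hq
    set m := PySem.Int.mod ((i * 9 + j : Nat) : Int) 9 with hm
    have hcast : ((i * 9 + j : Nat) : Int) = (i : Int) * 9 + (j : Int) := by push_cast; ring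
    refine ⟨⟨⟨by omega, by omega, by omega, by omega⟩, by omega⟩, by omega⟩
  · rintro ⟨rk, hmem, ⟨⟨h0, h90, hk0, hk7⟩, hidx⟩, hbit⟩
    have hfm := PySem.Int.floordiv_mul_add_mod (mh - rk.1) 9
    have hm0 := PySem.Int.mod_nonneg (mh - rk.1) (b := 9) (by omega)
    have hm9 := PySem.Int.mod_lt (mh - rk.1) (b := 9) (by omega)
    set q := PySem.Int.floordiv (mh - rk.1) 9 with hq
    set m := PySem.Int.mod (mh - rk.1) 9 with hm
    refine ⟨m.toNat, by omega, rk.2.toNat, by omega, ?_, by omega⟩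
    have h1 : (mh - ((i * 9 + m.toNat : Nat) : Int), (rk.2.toNat : Int)) = rk := by
      have : ((i * 9 + m.toNat : Nat) : Int) = (i : Int) * 9 + m := by push_cast; omega
      rw [this]
      have h2 : mh - ((i : Int) * 9 + m) = rk.1 := by omega
      exact Prod.ext h2 (by omega)
    rw [h1]
    exact hmem

lemma bor_cast (a : Nat) (n : Nat) :
    PySem.Int.bor (a : Int) ((1 : Int) <<< n) = ((a ||| 1 <<< n : Nat) : Int) := by
  rw [show (1 : Int) <<< n = ((1 <<< n : Nat) : Int) by simp [Int.shiftLeft_eq, Nat.shiftLeft_eq]]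
  exact PySem.Int.bor_natCast a (1 <<< n)

lemma foldl_lift {α : Type} (f : Int → α → Int) (g : Nat → α → Nat)
    (h : ∀ (a : Nat) (x : α), f (↑a) x = ((g a x : Nat) : Int)) :
    ∀ (L : List α) (a : Nat), L.foldl f (a : Int) = ((L.foldl g a : Nat) : Int) := by
  intro L
  induction L with
  | nil => intro a; rfl
  | cons x xs ih => intro a; rw [List.foldl_cons, List.foldl_cons, h, ih]

lemma A_eq_model (R : List (Int × Int)) (mh : Int) :
    top_90_rows_as_tuple R mh = (List.range 10).map (fun i => ((numAN R mh i : Nat) : Int)) := by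
  unfold top_90_rows_as_tuple
  rw [PySem.List.foldl_append_singleton_eq_map]
  apply List.map_congr_left
  intro i _
  dsimp only
  have hin : ∀ (j : Nat) (a : Nat) (k : Nat),
      (if (mh - ((i * 9 + j : Nat) : Int), (k : Int)) ∈ R then
        PySem.Int.bor (a : Int) ((1 : Int) <<< (j * 7 + k)) else (a : Int))
      = (((if (mh - ((i * 9 + j : Nat) : Int), (k : Int)) ∈ R then a ||| 1 <<< (j * 7 + k)
          else a : Nat)) : Int) := by
    intro j a k
    by_cases hm : (mh - ((i * 9 + j : Nat) : Int), (k : Int)) ∈ R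
    · rw [if_pos hm, if_pos hm, bor_cast]
    · rw [if_neg hm, if_neg hm]
  have hout : ∀ (a : Nat) (j : Nat),
      (List.range 7).foldl (fun (num : Int) (k : Nat) =>
        if (mh - ((i * 9 + j : Nat) : Int), (k : Int)) ∈ R then
          PySem.Int.bor num ((1 : Int) <<< (j * 7 + k)) else num) (a : Int)
      = (((List.range 7).foldl (fun (num : Nat) (k : Nat) =>
          if (mh - ((i * 9 + j : Nat) : Int), (k : Int)) ∈ R then num ||| 1 <<< (j * 7 + k)
          else num) a : Nat) : Int) := by
    intro a j
    exact foldl_lift _ _ (fun a k => hin j a k) (List.range 7) a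
  unfold numAN
  exact_mod_cast foldl_lift _ _ (fun a j => hout a j) (List.range 9) 0

lemma altB_eq_model (R : List (Int × Int)) (mh : Int) :
    top_90_rows_as_tuple_alt R mh
      = (R.foldl (stepBN mh) (List.replicate 10 0)).map (fun (n : Nat) => (n : Int)) := by
  unfold top_90_rows_as_tuple_alt
  have key : ∀ (L : List (Int × Int)) (ns : List Nat),
      L.foldl (fun nums rk =>
        let pos := mh - rk.1
        if 0 ≤ pos ∧ pos < 90 ∧ 0 ≤ rk.2 ∧ rk.2 < 7 then
          let idx := (PySem.Int.floordiv pos 9).toNat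
          nums.set idx (PySem.Int.bor (nums.getD idx 0)
            ((1 : Int) <<< ((PySem.Int.mod pos 9) * 7 + rk.2).toNat))
        else nums) (ns.map (fun (n : Nat) => (n : Int)))
      = (L.foldl (stepBN mh) ns).map (fun (n : Nat) => (n : Int)) := by
    intro L
    induction L with
    | nil => intro ns; rfl
    | cons rk L ih =>
      intro ns
      rw [List.foldl_cons, List.foldl_cons, ← ih]
      congr 1
      dsimp only
      by_cases hc : 0 ≤ mh - rk.1 ∧ mh - rk.1 < 90 ∧ 0 ≤ rk.2 ∧ rk.2 < 7
      · rw [if_pos hc]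
        unfold stepBN
        rw [if_pos hc]
        dsimp only
        have hgd : (ns.map (fun (n : Nat) => (n : Int))).getD ((PySem.Int.floordiv (mh - rk.1) 9).toNat) 0
            = ((ns.getD ((PySem.Int.floordiv (mh - rk.1) 9).toNat) 0 : Nat) : Int) := by
          simp only [List.getD_eq_getElem?_getD, List.getElem?_map]
          cases ns[(PySem.Int.floordiv (mh - rk.1) 9).toNat]? <;> simp
        rw [hgd, bor_cast, List.map_set]
      · rw [if_neg hc]
        unfold stepBN
        rw [if_neg hc]
  have := key R (List.replicate 10 0)
  simpa using this

lemma foldB_length (mh : Int) (R : List (Int × Int)) (ns : List Nat) :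
    (R.foldl (stepBN mh) ns).length = ns.length := by
  induction R generalizing ns with
  | nil => rfl
  | cons rk R ih =>
    rw [List.foldl_cons, ih]
    unfold stepBN; dsimp only; split <;> simp

lemma ports_agree (R : List (Int × Int)) (mh : Int) :
    top_90_rows_as_tuple R mh = top_90_rows_as_tuple_alt R mh := by
  rw [A_eq_model, altB_eq_model]
  apply List.ext_getElem
  · simp [foldB_length]
  · intro i h1 h2
    have hi : i < 10 := by simpa using h1
    have hlenB : (R.foldl (stepBN mh) (List.replicate 10 0)).length = 10 := by
      simp [foldB_length]
    simp only [List.getElem_map, List.getElem_range]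
    congr 1
    apply Nat.eq_of_testBit_eq
    intro t
    rw [numAN_testBit, gA_eq_gB R mh i t hi]
    have := foldB_testBit mh R (List.replicate 10 0) (by simp) i hi t
    rw [← List.getD_eq_getElem _ 0 (by omega), this,
      show ((List.replicate 10 (0 : Nat)).getD i 0) = 0 by
        rw [List.getD_eq_getElem _ _ (by simp [hi])]; exact List.getElem_replicate ..]
    simp [Nat.zero_testBit]

-- ===== VERDICT (by name: the statement is the Claim_ definition above) =====
theorem top_90_rows_as_tuple_spec : Claim_equal_top_90_rows_as_tuple := by
  intro R mh _
  unfold Spec_top_90_rows_as_tuple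
  exact ports_agree R mh
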